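-- pv_equiv track=rewrite | github.com/franjavi-upct-es/cid-upct | Prácticas/2º Curso/1º Cuatrimestre/ADA/ADA_boletin_P3/divide_y_venceras.py | resolver_directo
-- ===== SOURCE A (Python) =====
-- def resolver_directo(A, m, C):
--     """
--     Encuentra la subcadena óptima utilizando un método directo
--
--     :param A: Cadena original (str)
--     :param m: Longitud de la cadena (int)
--     :param C: Carácter a buscar (str)
--     :return: tuple: Índice de inicio de la subcadena óptima y el número máximo de apariciones consecutivas.
--     """
--     n = len(A)
--     max_consecutivos = 0
--     inicio_optimo = -1
--
--     # Recorrer todas las subcadenas de longitud m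
--     for i in range(n - m + 1):
--         subcadena = A[i:i + m]
--
--         # Contar el número máximo de apariciones consecutivas de C en la subcadena
--         contador_actual = 0
--         max_actual = 0
--
--         for char in subcadena:
--             if char == C:
--                 contador_actual += 1
--                 if contador_actual > max_actual:
--                     max_actual = contador_actual
--             else:
--                 contador_actual = 0
--
--         # Actualizar la mejor solución encontrada
--         if max_actual > max_consecutivos:
--             max_consecutivos = max_actual
--             inicio_optimo = i
--
--     return inicio_optimo, max_consecutivos
-- ===== SOURCE B (Python) =====
-- def resolver_directo(A, m, C):
--     n = len(A)
--     if m < 1 or n < m: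
--         return (-1, 0)
--     # pass 1: length of the longest consecutive run of C in the whole string
--     c = 0
--     lmax = 0
--     for ch in A:
--         if ch == C:
--             c += 1
--             if c > lmax:
--                 lmax = c
--         else:
--             c = 0
--     best = lmax if lmax < m else m
--     if best == 0:
--         return (-1, 0)
--     # pass 2: first position where a run reaches length `best`
--     hit = -1
--     c = 0
--     for j, ch in enumerate(A):
--         if ch == C:
--             c += 1
--             if hit < 0 and best <= c:
--                 hit = j
--         else:
--             c = 0
--     return (max(0, hit + 1 - m), best)
-- ===== Notes on version B (the rewrite author's own statement) =====
-- stated objective: faster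
-- what changed: Instead of scanning every length-m window (O(n*m)), B makes two linear passes: one computes the longest run of C in the whole string (the optimum is min(run,m)), the second finds the first position where a run reaches that length, from which the first optimal window start is max(0, pos+1-m).
-- outside the precondition, e.g. on resolver_directo('cc', -1, 'c'): A returns (0, 1), B returns (-1, 0)
import Mathlib
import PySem

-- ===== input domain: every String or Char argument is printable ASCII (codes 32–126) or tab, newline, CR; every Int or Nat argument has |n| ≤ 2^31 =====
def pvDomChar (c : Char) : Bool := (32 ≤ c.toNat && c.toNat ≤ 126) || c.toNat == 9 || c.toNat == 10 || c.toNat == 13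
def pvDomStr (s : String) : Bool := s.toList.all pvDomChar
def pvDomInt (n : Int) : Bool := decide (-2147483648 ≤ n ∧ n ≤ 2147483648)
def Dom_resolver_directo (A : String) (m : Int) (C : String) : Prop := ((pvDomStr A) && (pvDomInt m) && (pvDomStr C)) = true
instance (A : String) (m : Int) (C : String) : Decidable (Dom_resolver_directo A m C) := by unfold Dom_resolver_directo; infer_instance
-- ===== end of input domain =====

-- B replaces A's O(n*m) scan of every length-m window by two linear passes over the
-- string (longest C-run, then first position where a run reaches the optimum).

-- ===== PORT A =====
def resolver_directo (A : String) (m : Int) (C : String) : Int × Int :=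
  let n : Int := A.toList.length
  let r := (PySem.List.pyRange 0 (n - m + 1) 1).foldl
    (fun (st : Int × Int) (i : Int) =>
      let sub := PySem.List.slice A.toList (some i) (some (i + m))
      let inner := sub.foldl
        (fun (q : Int × Int) (ch : Char) =>
          if [ch] = C.toList then
            (q.1 + 1, if q.1 + 1 > q.2 then q.1 + 1 else q.2)
          else (0, q.2)) (0, 0)
      if inner.2 > st.1 then (inner.2, i) else st)
    (0, -1)
  (r.2, r.1)

-- ===== PORT B =====
def resolver_directo_alt (A : String) (m : Int) (C : String) : Int × Int :=
  let n : Int := A.toList.length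
  if m < 1 ∨ n < m then (-1, 0)
  else
    let p1 := A.toList.foldl
      (fun (q : Int × Int) (ch : Char) =>
        if [ch] = C.toList then
          (q.1 + 1, if q.1 + 1 > q.2 then q.1 + 1 else q.2)
        else (0, q.2)) (0, 0)
    let best := if p1.2 < m then p1.2 else m
    if best = 0 then (-1, 0)
    else
      let p2 := (PySem.List.enumerate A.toList 0).foldl
        (fun (q : Int × Int) (jc : Int × Char) =>
          if [jc.2] = C.toList then
            (if q.1 < 0 ∧ best ≤ q.2 + 1 then jc.1 else q.1, q.2 + 1)
          else (q.1, 0)) (-1, 0)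
      (max 0 (p2.1 + 1 - m), best)

-- ===== PRECONDITION & SPEC =====
-- Pre_ excludes negative m (a window length, naturally nonnegative): there A's slice
-- A[i:i+m] wraps around to end-anchored accidental windows; B reports "no window".
def Pre_resolver_directo (A : String) (m : Int) (C : String) : Prop := 0 ≤ m
instance (A : String) (m : Int) (C : String) : Decidable (Pre_resolver_directo A m C) := by unfold Pre_resolver_directo; infer_instance
def pvWitness_resolver_directo : String × Int × String := ("abcbb", 2, "b")

def Spec_resolver_directo (A : String) (m : Int) (C : String) (out : Int × Int) : Prop := out = resolver_directo_alt A m C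
instance (A : String) (m : Int) (C : String) (out : Int × Int) : Decidable (Spec_resolver_directo A m C out) := by unfold Spec_resolver_directo; infer_instance

-- ===== CLAIM (what is proved, stated in full; the proofs are below) =====
def Claim_equal_resolver_directo : Prop := ∀ (A : String) (m : Int) (C : String), Dom_resolver_directo A m C → Pre_resolver_directo A m C → Spec_resolver_directo A m C (resolver_directo A m C)

-- ===== LEMMAS AND PROOFS =====

-- counter/maximum pair maintained by the inner loop (ℕ shadow of the Int fold)
def pvStep (p : Char → Prop) [DecidablePred p] (q : ℕ × ℕ) (ch : Char) : ℕ × ℕ :=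
  if p ch then (q.1 + 1, max (q.1 + 1) q.2) else (0, q.2)

def pvRun (p : Char → Prop) [DecidablePred p] (l : List Char) : ℕ × ℕ :=
  l.foldl (pvStep p) (0, 0)

def pvCur (p : Char → Prop) [DecidablePred p] (l : List Char) : ℕ := (pvRun p l).1
def pvMx (p : Char → Prop) [DecidablePred p] (l : List Char) : ℕ := (pvRun p l).2

-- bare running counter from an arbitrary start value
def pvCurC (p : Char → Prop) [DecidablePred p] (c : ℕ) (l : List Char) : ℕ :=
  l.foldl (fun x ch => if p ch then x + 1 else 0) c

-- first index (within l) at which the running counter (started at c) reaches b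
def pvFH (p : Char → Prop) [DecidablePred p] (b : ℕ) : ℕ → List Char → Option ℕ
  | _, [] => none
  | c, ch :: l =>
      if p ch then
        (if b ≤ c + 1 then some 0 else (pvFH p b (c + 1) l).map (· + 1))
      else (pvFH p b 0 l).map (· + 1)

theorem pvRun_append (p : Char → Prop) [DecidablePred p] (l : List Char) (ch : Char) :
    pvRun p (l ++ [ch]) = pvStep p (pvRun p l) ch := by
  simp [pvRun, List.foldl_append]

theorem pvCur_le (p : Char → Prop) [DecidablePred p] (l : List Char) :
    pvCur p l ≤ l.length := by
  induction l using List.reverseRecOn with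
  | nil => simp [pvCur, pvRun]
  | append_singleton l ch ih =>
      simp only [pvCur, pvRun_append, pvStep] at *
      split <;> simp <;> omega

theorem pvCur_le_mx (p : Char → Prop) [DecidablePred p] (l : List Char) :
    pvCur p l ≤ pvMx p l := by
  induction l using List.reverseRecOn with
  | nil => simp [pvCur, pvMx, pvRun]
  | append_singleton l ch ih =>
      simp only [pvCur, pvMx, pvRun_append, pvStep]
      split <;> simp <;> omega

theorem pvMx_append_le (p : Char → Prop) [DecidablePred p] (l l₂ : List Char) :
    pvMx p l ≤ pvMx p (l ++ l₂) := by
  induction l₂ using List.reverseRecOn with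
  | nil => simp
  | append_singleton l₂ ch ih =>
      have : l ++ (l₂ ++ [ch]) = (l ++ l₂) ++ [ch] := by simp
      rw [this]
      simp only [pvMx, pvRun_append, pvStep] at *
      split <;> simp <;> omega

theorem pvMx_ge_cur_prefix (p : Char → Prop) [DecidablePred p] (l : List Char) (j : ℕ) :
    pvCur p (l.take j) ≤ pvMx p l := by
  calc pvCur p (l.take j) ≤ pvMx p (l.take j) := pvCur_le_mx p _
    _ ≤ pvMx p (l.take j ++ l.drop j) := pvMx_append_le p _ _
    _ = pvMx p l := by rw [List.take_append_drop]

theorem pvMx_exists (p : Char → Prop) [DecidablePred p] (l : List Char) :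
    ∃ j, j ≤ l.length ∧ pvCur p (l.take j) = pvMx p l := by
  induction l using List.reverseRecOn with
  | nil => exact ⟨0, by simp [pvCur, pvMx, pvRun]⟩
  | append_singleton l ch ih =>
      obtain ⟨j, hj, hcur⟩ := ih
      by_cases hp : p ch
      · by_cases hge : pvMx p l ≤ pvCur p l + 1
        · refine ⟨l.length + 1, by simp, ?_⟩
          have htake : (l ++ [ch]).take (l.length + 1) = l ++ [ch] := by
            apply List.take_of_length_le; simp
          rw [htake]
          simp only [pvCur, pvMx, pvRun_append, pvStep, if_pos hp]
          simpa using (Nat.max_eq_left hge).symm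
        · refine ⟨j, by simp; omega, ?_⟩
          rw [List.take_append_of_le_length hj, hcur]
          simp only [pvMx, pvRun_append, pvStep, if_pos hp]
          have : max (pvCur p l + 1) (pvMx p l) = pvMx p l := Nat.max_eq_right (by omega)
          simpa [pvCur, pvMx, pvRun] using this.symm
      · refine ⟨j, by simp; omega, ?_⟩
        rw [List.take_append_of_le_length hj, hcur]
        simp only [pvMx, pvRun_append, pvStep, if_neg hp]

theorem pvCur_take_succ_le (p : Char → Prop) [DecidablePred p] (l : List Char) (j : ℕ) :
    pvCur p (l.take (j + 1)) ≤ pvCur p (l.take j) + 1 := by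
  rcases Nat.lt_or_ge j l.length with h | h
  · rw [List.take_succ, List.getElem?_eq_getElem h]
    simp only [Option.toList_some]
    simp only [pvCur, pvRun_append, pvStep]
    split <;> simp <;> omega
  · rw [List.take_of_length_le h, List.take_of_length_le (by omega)]
    omega

theorem pvCur_drop_take (p : Char → Prop) [DecidablePred p] (l : List Char) (i : ℕ) :
    ∀ k, i + k ≤ l.length →
      pvCur p ((l.drop i).take k) = min (pvCur p (l.take (i + k))) k := by
  intro k
  induction k with
  | zero => intro _; simp [pvCur, pvRun]
  | succ k ih =>
      intro hk
      have hik : i + k < l.length := by omega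
      have h1 : (l.drop i).take (k + 1) = (l.drop i).take k ++ [l[i + k]] := by
        rw [List.take_succ, List.getElem?_eq_getElem (by simp; omega)]
        simp [List.getElem_drop]
      have h2 : l.take (i + k + 1) = l.take (i + k) ++ [l[i + k]] := by
        rw [List.take_succ, List.getElem?_eq_getElem hik]
        simp
      rw [show i + (k+1) = i + k + 1 by omega, h1, h2]
      simp only [pvCur, pvRun_append, pvStep]
      have := ih (by omega)
      simp only [pvCur] at this
      split <;> simp [this] <;> omega

-- Int fold of the counter/max loop = ℕ shadow (both A's inner loop and B's pass 1)
theorem pvBridge1 (p : Char → Prop) [DecidablePred p] (l : List Char) :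
    ∀ (x y : ℕ),
      l.foldl (fun (q : Int × Int) (ch : Char) =>
          if p ch then (q.1 + 1, if q.1 + 1 > q.2 then q.1 + 1 else q.2)
          else (0, q.2)) ((x : Int), (y : Int))
      = (((l.foldl (pvStep p) (x, y)).1 : Int), ((l.foldl (pvStep p) (x, y)).2 : Int)) := by
  induction l with
  | nil => intro x y; simp
  | cons ch l ih =>
      intro x y
      simp only [List.foldl_cons, pvStep]
      by_cases hp : p ch
      · rw [if_pos hp, if_pos hp]
        have hstate : (((x : Int) + 1, if (x : Int) + 1 > (y : Int) then (x : Int) + 1 else (y : Int)) : Int × Int)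
            = (((x + 1 : ℕ) : Int), ((max (x + 1) y : ℕ) : Int)) := by
          simp only [Prod.mk.injEq]
          refine ⟨by push_cast; ring, ?_⟩
          split <;> push_cast <;> omega
        rw [hstate]
        exact ih (x + 1) (max (x + 1) y)
      · rw [if_neg hp, if_neg hp]
        exact ih 0 y

theorem pvRun_fst (p : Char → Prop) [DecidablePred p] (l : List Char) :
    ∀ (x y : ℕ), (l.foldl (pvStep p) (x, y)).1 = pvCurC p x l := by
  induction l with
  | nil => intro x y; simp [pvCurC]
  | cons ch l ih =>
      intro x y
      simp only [List.foldl_cons, pvStep, pvCurC]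
      by_cases hp : p ch
      · rw [if_pos hp, if_pos hp]; exact ih (x + 1) (max (x + 1) y)
      · rw [if_neg hp, if_neg hp]; exact ih 0 y

theorem pvCurC_cons (p : Char → Prop) [DecidablePred p] (c : ℕ) (ch : Char) (l : List Char) :
    pvCurC p c (ch :: l) = pvCurC p (if p ch then c + 1 else 0) l := by
  simp only [pvCurC, List.foldl_cons]

theorem pvCur_eq_curC (p : Char → Prop) [DecidablePred p] (l : List Char) :
    pvCur p l = pvCurC p 0 l := pvRun_fst p l 0 0

-- pass-2 fold, hit already set: hit never changes
theorem pvBridge2a (p : Char → Prop) [DecidablePred p] (b : ℕ) (l : List Char) :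
    ∀ (s h : Int) (x : ℕ), 0 ≤ h →
      (PySem.List.enumerate l s).foldl
        (fun (q : Int × Int) (jc : Int × Char) =>
          if p jc.2 then
            (if q.1 < 0 ∧ (b : Int) ≤ q.2 + 1 then jc.1 else q.1, q.2 + 1)
          else (q.1, 0)) (h, (x : Int))
      = (h, ((pvCurC p x l : ℕ) : Int)) := by
  induction l with
  | nil => intro s h x _; simp [PySem.List.enumerate_nil, pvCurC]
  | cons ch l ih =>
      intro s h x hh
      rw [PySem.List.enumerate_cons]
      simp only [List.foldl_cons]
      by_cases hp : p ch
      · rw [if_pos hp, pvCurC_cons, if_pos hp]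
        have : ¬(h < 0 ∧ (b : Int) ≤ (x : Int) + 1) := by omega
        rw [if_neg this]
        rw [show ((x : Int) + 1) = ((x + 1 : ℕ) : Int) by push_cast; ring]
        exact ih (s + 1) h (x + 1) hh
      · rw [if_neg hp, pvCurC_cons, if_neg hp]
        rw [show ((h, (0 : Int)) : Int × Int) = (h, ((0 : ℕ) : Int)) by norm_num]
        exact ih (s + 1) h 0 hh

-- pass-2 fold from unset hit: computes pvFH
theorem pvBridge2b (p : Char → Prop) [DecidablePred p] (b : ℕ) (l : List Char) :
    ∀ (s : Int) (x : ℕ), 0 ≤ s →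
      (PySem.List.enumerate l s).foldl
        (fun (q : Int × Int) (jc : Int × Char) =>
          if p jc.2 then
            (if q.1 < 0 ∧ (b : Int) ≤ q.2 + 1 then jc.1 else q.1, q.2 + 1)
          else (q.1, 0)) (-1, (x : Int))
      = ((match pvFH p b x l with
          | some t => s + (t : Int)
          | none => -1), ((pvCurC p x l : ℕ) : Int)) := by
  induction l with
  | nil => intro s x _; simp [PySem.List.enumerate_nil, pvCurC, pvFH]
  | cons ch l ih =>
      intro s x hs
      rw [PySem.List.enumerate_cons]
      simp only [List.foldl_cons]
      by_cases hp : p ch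
      · rw [if_pos hp, pvCurC_cons, if_pos hp]
        by_cases hb : (b : Int) ≤ (x : Int) + 1
        · rw [if_pos (by constructor <;> omega)]
          rw [show ((x : Int) + 1) = ((x + 1 : ℕ) : Int) by push_cast; ring]
          rw [pvBridge2a p b l (s + 1) s (x + 1) hs]
          have hbn : b ≤ x + 1 := by omega
          simp [pvFH, hp, hbn]
        · rw [if_neg (by omega)]
          rw [show ((x : Int) + 1) = ((x + 1 : ℕ) : Int) by push_cast; ring]
          rw [ih (s + 1) (x + 1) (by omega)]
          have hbn : ¬ b ≤ x + 1 := by omega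
          simp only [pvFH, if_pos hp, if_neg hbn]
          cases h : pvFH p b (x + 1) l <;> simp [h] <;> push_cast <;> ring
      · rw [if_neg hp, pvCurC_cons, if_neg hp]
        rw [show (((-1 : Int), (0 : Int)) : Int × Int) = (-1, ((0 : ℕ) : Int)) by norm_num]
        rw [ih (s + 1) 0 (by omega)]
        simp only [pvFH, if_neg hp]
        cases h : pvFH p b 0 l <;> simp [h] <;> push_cast <;> ring

theorem pvFH_some (p : Char → Prop) [DecidablePred p] (b : ℕ) (hb : 1 ≤ b) (l : List Char) :
    ∀ (c t : ℕ), pvFH p b c l = some t →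
      t < l.length ∧ b ≤ pvCurC p c (l.take (t + 1)) ∧
        ∀ u < t, pvCurC p c (l.take (u + 1)) < b := by
  induction l with
  | nil => intro c t h; simp [pvFH] at h
  | cons ch l ih =>
      intro c t h
      by_cases hp : p ch
      · by_cases hb2 : b ≤ c + 1
        · simp only [pvFH, if_pos hp, if_pos hb2, Option.some.injEq] at h
          subst h
          refine ⟨by simp, ?_, by omega⟩
          simp [pvCurC_cons, if_pos hp, pvCurC]
          omega
        · simp only [pvFH, if_pos hp, if_neg hb2, Option.map_eq_some_iff] at h
          obtain ⟨t', ht', rfl⟩ := h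
          obtain ⟨h1, h2, h3⟩ := ih (c + 1) t' ht'
          refine ⟨by simp; omega, ?_, ?_⟩
          · rw [show t' + 1 + 1 = (t' + 1) + 1 by omega, List.take_succ_cons,
                pvCurC_cons, if_pos hp]
            exact h2
          · intro u hu
            cases u with
            | zero => simp [List.take_succ_cons, pvCurC_cons, if_pos hp, pvCurC]; omega
            | succ u' =>
                rw [show u' + 1 + 1 = (u' + 1) + 1 by omega, List.take_succ_cons,
                    pvCurC_cons, if_pos hp]
                exact h3 u' (by omega)
      · simp only [pvFH, if_neg hp, Option.map_eq_some_iff] at h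
        obtain ⟨t', ht', rfl⟩ := h
        obtain ⟨h1, h2, h3⟩ := ih 0 t' ht'
        refine ⟨by simp; omega, ?_, ?_⟩
        · rw [show t' + 1 + 1 = (t' + 1) + 1 by omega, List.take_succ_cons,
              pvCurC_cons, if_neg hp]
          exact h2
        · intro u hu
          cases u with
          | zero => simp [List.take_succ_cons, pvCurC_cons, if_neg hp, pvCurC]; omega
          | succ u' =>
              rw [show u' + 1 + 1 = (u' + 1) + 1 by omega, List.take_succ_cons,
                  pvCurC_cons, if_neg hp]
              exact h3 u' (by omega)

theorem pvFH_none (p : Char → Prop) [DecidablePred p] (b : ℕ) (hb : 1 ≤ b) (l : List Char) :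
    ∀ (c : ℕ), pvFH p b c l = none →
      ∀ j, 1 ≤ j → j ≤ l.length → pvCurC p c (l.take j) < b := by
  induction l with
  | nil => intro c _ j h1 h2; simp at h2; omega
  | cons ch l ih =>
      intro c h j h1 h2
      by_cases hp : p ch
      · by_cases hb2 : b ≤ c + 1
        · simp [pvFH, if_pos hp, if_pos hb2] at h
        · simp only [pvFH, if_pos hp, if_neg hb2, Option.map_eq_none_iff] at h
          cases j with
          | zero => omega
          | succ j' =>
              rw [List.take_succ_cons, pvCurC_cons, if_pos hp]
              cases Nat.eq_zero_or_pos j' with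
              | inl h0 => subst h0; simp [pvCurC]; omega
              | inr hpos => exact ih (c + 1) h j' hpos (by simpa using h2)
      · simp only [pvFH, if_neg hp, Option.map_eq_none_iff] at h
        cases j with
        | zero => omega
        | succ j' =>
            rw [List.take_succ_cons, pvCurC_cons, if_neg hp]
            cases Nat.eq_zero_or_pos j' with
            | inl h0 => subst h0; simp [pvCurC]; omega
            | inr hpos => exact ih 0 h j' hpos (by simpa using h2)

-- outer fold: all values ≤ current max ⇒ state unchanged
theorem pvFoldB (g : ℕ → ℕ) (L : List ℕ) :
    ∀ (s : Int × Int), (∀ x ∈ L, ((g x : ℕ) : Int) ≤ s.1) →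
      L.foldl (fun st k => if ((g k : ℕ) : Int) > st.1 then (((g k : ℕ) : Int), (k : Int)) else st) s = s := by
  induction L with
  | nil => intro s _; rfl
  | cons a L ih =>
      intro s hs
      simp only [List.foldl_cons]
      rw [if_neg (by have := hs a (by simp); omega)]
      exact ih s fun x hx => hs x (by simp [hx])

-- outer fold: all values < b keeps the running max < b
theorem pvFoldA (g : ℕ → ℕ) (b : ℕ) (L : List ℕ) :
    ∀ (s : Int × Int), s.1 < (b : Int) → (∀ x ∈ L, g x < b) →
      (L.foldl (fun st k => if ((g k : ℕ) : Int) > st.1 then (((g k : ℕ) : Int), (k : Int)) else st) s).1 < (b : Int) := by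
  induction L with
  | nil => intro s hs _; exact hs
  | cons a L ih =>
      intro s hs hL
      simp only [List.foldl_cons]
      split
      · exact ih _ (by have := hL a (by simp); simp; omega) fun x hx => hL x (by simp [hx])
      · exact ih s hs fun x hx => hL x (by simp [hx])


-- window maximum is bounded by min(global maximum, window length)
theorem pvWub (p : Char → Prop) [DecidablePred p] (l : List Char) (m' k : ℕ)
    (hk : k + m' ≤ l.length) :
    pvMx p ((l.drop k).take m') ≤ min (pvMx p l) m' := by
  obtain ⟨j, hj, hcur⟩ := pvMx_exists p ((l.drop k).take m')
  have hlen : ((l.drop k).take m').length = m' := by simp; omega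
  rw [hlen] at hj
  rw [List.take_take, min_eq_left hj, pvCur_drop_take p l k j (by omega)] at hcur
  have h1 := pvMx_ge_cur_prefix p l (k + j)
  omega

theorem pvCur_nil (p : Char → Prop) [DecidablePred p] : pvCur p ([] : List Char) = 0 := by
  simp [pvCur, pvRun]

-- the counter reaches the optimum somewhere, so pvFH finds a hit
theorem pvFHexists (p : Char → Prop) [DecidablePred p] (l : List Char) (m' : ℕ)
    (hb1 : 1 ≤ min (pvMx p l) m') :
    ∃ t, pvFH p (min (pvMx p l) m') 0 l = some t := by
  cases h : pvFH p (min (pvMx p l) m') 0 l with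
  | some t => exact ⟨t, rfl⟩
  | none =>
      exfalso
      obtain ⟨j, hj, hcur⟩ := pvMx_exists p l
      have hj1 : 1 ≤ j := by
        by_contra h0
        have : j = 0 := by omega
        subst this
        simp [pvCur_nil] at hcur
        omega
      have := pvFH_none p (min (pvMx p l) m') hb1 l 0 h j hj1 hj
      rw [← pvCur_eq_curC, hcur] at this
      omega

-- first-strict-improvement fold = (max value, first argmax)
theorem pvFoldStep (g : ℕ → ℕ) (s : Int × Int) (k : ℕ) :
    (List.foldl (fun (st : Int × Int) k =>
        if ((g k : ℕ) : Int) > st.1 then (((g k : ℕ) : Int), (k : Int)) else st) s [k])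
    = if ((g k : ℕ) : Int) > s.1 then (((g k : ℕ) : Int), (k : Int)) else s := rfl

theorem pvArgmax (g : ℕ → ℕ) (b N i0 : ℕ) (hb : 1 ≤ b) (hi0 : i0 < N)
    (hg0 : g i0 = b) (hub : ∀ k, k < N → g k ≤ b) (hlt : ∀ k, k < i0 → g k < b) :
    (List.range N).foldl
      (fun (st : Int × Int) k =>
        if ((g k : ℕ) : Int) > st.1 then (((g k : ℕ) : Int), (k : Int)) else st)
      (0, -1) = ((b : Int), (i0 : Int)) := by
  have hsplit : List.range N = (List.range i0 ++ [i0]) ++ (List.range (N - (i0 + 1))).map (i0 + 1 + ·) := by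
    rw [← List.range_succ, ← List.range_add]
    congr 1
    omega
  rw [hsplit, List.foldl_append, List.foldl_append]
  have h1 : ((List.range i0).foldl
      (fun (st : Int × Int) k =>
        if ((g k : ℕ) : Int) > st.1 then (((g k : ℕ) : Int), (k : Int)) else st)
      (0, -1)).1 < (b : Int) := by
    apply pvFoldA g b
    · simp; omega
    · intro x hx
      exact hlt x (by simpa using hx)
  rw [pvFoldStep, if_pos (by rw [hg0]; exact h1)]
  rw [hg0]
  apply pvFoldB
  intro x hx
  simp only [List.mem_map, List.mem_range] at hx
  obtain ⟨x', hx', rfl⟩ := hx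
  have := hub (i0 + 1 + x') (by omega)
  simp
  omega

-- A's outer loop, evaluated: (optimum, first optimal start)
theorem pvAeval (p : Char → Prop) [DecidablePred p] (l : List Char) (m' t : ℕ)
    (hm1 : 1 ≤ m') (hmn : m' ≤ l.length)
    (hb1 : 1 ≤ min (pvMx p l) m')
    (hFH : pvFH p (min (pvMx p l) m') 0 l = some t) :
    (List.range (l.length - m' + 1)).foldl
      (fun (st : Int × Int) k =>
        if ((pvMx p ((l.drop k).take m') : ℕ) : Int) > st.1
        then (((pvMx p ((l.drop k).take m') : ℕ) : Int), (k : Int)) else st)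
      (0, -1)
    = (((min (pvMx p l) m' : ℕ) : Int), (((t + 1) - m' : ℕ) : Int)) := by
  set b := min (pvMx p l) m' with hbdef
  obtain ⟨htn, hbf, hmin⟩ := pvFH_some p b hb1 l 0 t hFH
  rw [← pvCur_eq_curC] at hbf
  -- f j := pvCur p (l.take j); facts about j0 := t + 1
  have hfmin : ∀ j, j < t + 1 → pvCur p (l.take j) < b := by
    intro j hj
    cases j with
    | zero => simp [pvCur_nil]; omega
    | succ u =>
        have := hmin u (by omega)
        rw [← pvCur_eq_curC] at this
        exact this
  have hfj0 : pvCur p (l.take (t + 1)) = b := by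
    have h1 := pvCur_take_succ_le p l t
    have h2 := hfmin t (by omega)
    omega
  have hbj0 : b ≤ t + 1 := by
    have h1 := pvCur_le p (l.take (t + 1))
    have h2 : (l.take (t + 1)).length ≤ t + 1 := by simp
    omega
  have hbm : b ≤ m' := by omega
  set i0 := (t + 1) - m' with hi0def
  have hwin : i0 + m' ≤ l.length := by omega
  -- the window at i0 attains b
  have hg0 : pvMx p ((l.drop i0).take m') = b := by
    have hub := pvWub p l m' i0 hwin
    set k := (t + 1) - i0 with hkdef
    have hk1 : i0 + k = t + 1 := by omega
    have hk2 : k ≤ m' := by omega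
    have hk3 : b ≤ k := by omega
    have hcur := pvCur_drop_take p l i0 k (by omega)
    rw [hk1, hfj0] at hcur
    have hpre := pvMx_ge_cur_prefix p ((l.drop i0).take m') k
    rw [List.take_take, min_eq_left hk2] at hpre
    omega
  -- windows before i0 stay below b
  have hlt : ∀ k, k < i0 → pvMx p ((l.drop k).take m') < b := by
    intro k hk
    by_contra hge
    push_neg at hge
    obtain ⟨j, hj, hcur⟩ := pvMx_exists p ((l.drop k).take m')
    have hklen : k + m' ≤ l.length := by omega
    have hlen : ((l.drop k).take m').length = m' := by simp; omega
    rw [hlen] at hj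
    rw [List.take_take, min_eq_left hj, pvCur_drop_take p l k j (by omega)] at hcur
    have hf : b ≤ pvCur p (l.take (k + j)) := by omega
    have : ¬ (k + j < t + 1) := by
      intro hlt2
      have := hfmin (k + j) hlt2
      omega
    omega
  exact pvArgmax _ b _ i0 hb1 (by omega) hg0
    (fun k hk => by have := pvWub p l m' k (by omega); omega) hlt

-- ===== VERDICT (by name: the statement is the Claim_ definition above) =====
theorem resolver_directo_spec : Claim_equal_resolver_directo := by
  intro A m C _ hpre
  unfold Pre_resolver_directo at hpre
  unfold Spec_resolver_directo
  unfold resolver_directo resolver_directo_alt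
  dsimp only
  set l := A.toList with hldef
  obtain ⟨m', rfl⟩ : ∃ k : ℕ, m = (k : Int) := ⟨m.toNat, by omega⟩
  have hB1 : ∀ (xs : List Char),
      xs.foldl (fun (q : Int × Int) (ch : Char) =>
        if [ch] = C.toList then (q.1 + 1, if q.1 + 1 > q.2 then q.1 + 1 else q.2)
        else (0, q.2)) ((0 : Int), (0 : Int))
      = (((pvCur (fun ch => [ch] = C.toList) xs : ℕ) : Int),
         ((pvMx (fun ch => [ch] = C.toList) xs : ℕ) : Int)) := by
    intro xs
    have h := pvBridge1 (fun ch => [ch] = C.toList) xs 0 0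
    simpa [pvCur, pvMx, pvRun] using h
  by_cases hmn : l.length < m'
  · -- m > n: A's range is empty, B takes its first branch
    rw [PySem.List.pyRange_one_eq_nil (by omega)]
    rw [if_pos (by right; exact_mod_cast hmn)]
    rfl
  · push_neg at hmn
    -- normalise A's loop to a fold over List.range
    have hrange : PySem.List.pyRange 0 ((l.length : Int) - (m' : Int) + 1) 1
        = (List.range (l.length - m' + 1)).map (fun k : ℕ => (k : Int)) := by
      rw [PySem.List.pyRange_one]
      have h1 : (((l.length : Int) - (m' : Int) + 1) - 0).toNat = l.length - m' + 1 := by omega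
      rw [h1]
      simp
    rw [hrange, List.foldl_map]
    have hslice : ∀ k : ℕ,
        PySem.List.slice l (some ((k : ℕ) : Int)) (some (((k : ℕ) : Int) + (m' : Int)))
        = (l.drop k).take m' := fun k => PySem.List.slice_natCast_add l k m'
    simp only [hslice, hB1]
    by_cases hb0 : min (pvMx (fun ch => [ch] = C.toList) l) m' = 0
    · -- no window contains C at all (or m = 0): both return (-1, 0)
      have hz : (List.range (l.length - m' + 1)).foldl
          (fun (st : Int × Int) (k : ℕ) =>
            if ((pvMx (fun ch => [ch] = C.toList) ((l.drop k).take m') : ℕ) : Int) > st.1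
            then (((pvMx (fun ch => [ch] = C.toList) ((l.drop k).take m') : ℕ) : Int), (k : Int)) else st)
          (0, -1) = (0, -1) := by
        apply pvFoldB
        intro x hx
        simp only [List.mem_range] at hx
        have := pvWub (fun ch => [ch] = C.toList) l m' x (by omega)
        simp
        omega
      rw [hz]
      by_cases hm0 : m' = 0
      · rw [if_pos (by left; omega)]
      · rw [if_neg (by push_neg; constructor <;> omega)]
        rw [if_pos (by split <;> omega)]
    · -- a window attains the optimum best = min(longest run, m)
      have hb1 : 1 ≤ min (pvMx (fun ch => [ch] = C.toList) l) m' := by omega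
      have hm1 : 1 ≤ m' := by omega
      obtain ⟨t, hFH⟩ := pvFHexists (fun ch => [ch] = C.toList) l m' hb1
      rw [pvAeval (fun ch => [ch] = C.toList) l m' t hm1 hmn hb1 hFH]
      rw [if_neg (by push_neg; constructor <;> omega)]
      have hbest : (if ((pvMx (fun ch => [ch] = C.toList) l : ℕ) : Int) < (m' : Int)
          then ((pvMx (fun ch => [ch] = C.toList) l : ℕ) : Int) else (m' : Int))
          = ((min (pvMx (fun ch => [ch] = C.toList) l) m' : ℕ) : Int) := by
        split <;> omega
      rw [hbest]
      rw [if_neg (by omega)]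
      have hB2 := pvBridge2b (fun ch => [ch] = C.toList)
        (min (pvMx (fun ch => [ch] = C.toList) l) m') l 0 0 (by omega)
      rw [show ((-1 : Int), (0 : Int)) = ((-1 : Int), ((0 : ℕ) : Int)) by norm_num]
      rw [hB2, hFH]
      have hmax : max (0 : Int) ((0 : Int) + (t : Int) + 1 - (m' : Int))
          = ((t + 1 - m' : ℕ) : Int) := by
        by_cases h : (0 : Int) + (t : Int) + 1 - (m' : Int) ≤ 0
        · rw [max_eq_left h]; omega
        · rw [max_eq_right (by omega : (0 : Int) ≤ (0 : Int) + (t : Int) + 1 - (m' : Int))]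
          omega
      simp only [Prod.mk.injEq]
      exact ⟨hmax.symm, by trivial⟩
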